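-- pv_equiv track=rewrite | github.com/joneslogan1106/Comms | src/Server/db.py | fetch_message
-- ===== SOURCE A (Python) =====
-- def fetch_message(message):
--     i = ""
--     mode = 0
--     for v in message:
--         if v == ";" and mode != 3:
--             mode += 1
--         if mode == 3:
--             i += v
--     return i
-- ===== SOURCE B (Python) =====
-- def fetch_message(message):
--     rest = message
--     for _ in range(3):
--         j = rest.find(';')
--         if j == -1:
--             return ""
--         rest = rest[j + 1:]
--     return ';' + rest
-- ===== Notes on version B (the rewrite author's own statement) =====
-- stated objective: simpler
-- what changed: Replaces A's character-by-character mode-counting state machine with three str.find calls that jump to each semicolon and one final slice.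
import Mathlib
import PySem

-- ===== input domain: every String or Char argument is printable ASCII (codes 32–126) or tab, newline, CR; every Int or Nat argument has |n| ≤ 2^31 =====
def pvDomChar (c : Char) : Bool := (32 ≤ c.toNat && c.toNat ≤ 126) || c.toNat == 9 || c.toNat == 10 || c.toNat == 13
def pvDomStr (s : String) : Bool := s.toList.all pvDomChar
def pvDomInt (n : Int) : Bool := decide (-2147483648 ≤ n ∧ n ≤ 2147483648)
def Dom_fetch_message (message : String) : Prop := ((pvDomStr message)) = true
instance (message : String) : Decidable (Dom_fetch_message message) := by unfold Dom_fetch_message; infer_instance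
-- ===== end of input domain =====

-- B replaces A's per-character mode-counting loop with three find() jumps and one slice (simpler control flow).

-- ===== PORT A =====
-- for-loop over the characters with accumulator i and counter mode
def fmA_go : List Char → List Char → Nat → List Char
  | [], i, _ => i
  | v :: rest, i, mode =>
      let mode' := if v = ';' ∧ mode ≠ 3 then mode + 1 else mode
      let i' := if mode' = 3 then i ++ [v] else i
      fmA_go rest i' mode'

def fetch_message (message : String) : String :=
  String.ofList (fmA_go message.toList [] 0)

-- ===== PORT B =====
-- the 'for _ in range(3)' loop with early return, as recursion on the loop counter
def fmB_go : Nat → List Char → Option (List Char)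
  | 0, rest => some rest
  | k + 1, rest =>
      let j := PySem.Chars.find rest [';']
      if j = -1 then none
      else fmB_go k (PySem.List.slice rest (some (j + 1)) none)

def fetch_message_alt (message : String) : String :=
  match fmB_go 3 message.toList with
  | none => ""
  | some rest => String.ofList (';' :: rest)

-- ===== PRECONDITION & SPEC =====
def Spec_fetch_message (message : String) (out : String) : Prop := out = fetch_message_alt message
instance (message : String) (out : String) : Decidable (Spec_fetch_message message out) := by unfold Spec_fetch_message; infer_instance

-- ===== CLAIM (what is proved, stated in full; the proofs are below) =====
def Claim_equal_fetch_message : Prop := ∀ (message : String), Dom_fetch_message message → Spec_fetch_message message (fetch_message message)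

-- ===== LEMMAS AND PROOFS =====

-- the common specification: suffix of cs starting at its k-th semicolon (inclusive), [] if fewer
def fmS : List Char → Nat → List Char
  | [], _ => []
  | c :: cs, k => if c = ';' then (if k = 1 then c :: cs else fmS cs (k - 1)) else fmS cs k

theorem fmA_go_three (cs : List Char) : ∀ (i : List Char), fmA_go cs i 3 = i ++ cs := by
  induction cs with
  | nil => intro i; simp [fmA_go]
  | cons v rest ih => intro i; simp [fmA_go, ih]

theorem fmA_go_spec (cs : List Char) : ∀ (m : Nat), m < 3 →
    fmA_go cs [] m = fmS cs (3 - m) := by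
  induction cs with
  | nil => intro m _; simp [fmA_go, fmS]
  | cons v rest ih =>
      intro m hm
      by_cases hv : v = ';'
      · subst hv
        by_cases h2 : m = 2
        · subst h2
          rw [show fmA_go (';' :: rest) [] 2 = fmA_go rest [';'] 3 from by
                simp [fmA_go]]
          rw [fmA_go_three, show fmS (';' :: rest) (3 - 2) = ';' :: rest from by
                simp [fmS]]
          rfl
        · have hne3 : m ≠ 3 := by omega
          have hne3' : ¬ (m + 1 = 3) := by omega
          rw [show fmA_go (';' :: rest) [] m = fmA_go rest [] (m + 1) from by
                simp [fmA_go, hne3, hne3']]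
          rw [ih (m + 1) (by omega)]
          rw [show fmS (';' :: rest) (3 - m) = fmS rest (3 - m - 1) from by
                simp [fmS, show ¬ (3 - m = 1) from by omega]]
          congr 1
      · have hcond : ¬ (v = ';' ∧ m ≠ 3) := fun h => hv h.1
        have hm3 : ¬ (m = 3) := by omega
        rw [show fmA_go (v :: rest) [] m = fmA_go rest [] m from by
              simp [fmA_go, hv, hm3]]
        rw [ih m hm, show fmS (v :: rest) (3 - m) = fmS rest (3 - m) from by
              simp [fmS, hv]]

theorem fmS_not_mem (cs : List Char) (h : ';' ∉ cs) (k : Nat) : fmS cs k = [] := by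
  induction cs with
  | nil => simp [fmS]
  | cons c rest ih =>
      simp only [List.mem_cons, not_or] at h
      have hc : ¬ (c = ';') := fun e => h.1 e.symm
      simp [fmS, hc, ih h.2]

theorem fmS_one (cs : List Char) (h : ';' ∈ cs) :
    fmS cs 1 = ';' :: cs.drop (cs.idxOf ';' + 1) := by
  induction cs with
  | nil => cases h
  | cons c rest ih =>
      by_cases hc : c = ';'
      · subst hc; simp [fmS, List.idxOf_cons_self]
      · have hr : ';' ∈ rest := by
          cases h with
          | head => exact absurd rfl hc
          | tail _ h => exact h
        rw [show fmS (c :: rest) 1 = fmS rest 1 from by simp [fmS, hc]]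
        rw [ih hr, List.idxOf_cons_ne rest hc, Nat.succ_eq_add_one, List.drop_succ_cons]

theorem fmS_succ (cs : List Char) (h : ';' ∈ cs) (k : Nat) (hk : 1 ≤ k) :
    fmS cs (k + 1) = fmS (cs.drop (cs.idxOf ';' + 1)) k := by
  induction cs with
  | nil => cases h
  | cons c rest ih =>
      by_cases hc : c = ';'
      · subst hc
        have h1 : ¬ (k = 0) := by omega
        rw [show fmS (';' :: rest) (k + 1) = fmS rest k from by simp [fmS, h1]]
        simp [List.idxOf_cons_self]
      · have hr : ';' ∈ rest := by
          cases h with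
          | head => exact absurd rfl hc
          | tail _ h => exact h
        rw [show fmS (c :: rest) (k + 1) = fmS rest (k + 1) from by simp [fmS, hc]]
        rw [ih hr, List.idxOf_cons_ne rest hc, Nat.succ_eq_add_one, List.drop_succ_cons]

theorem prefix_singleton_iff (a : Char) (l : List Char) :
    [a] <+: l ↔ l.head? = some a := by
  cases l with
  | nil => simp
  | cons b t => simp [List.cons_prefix_cons, eq_comm]

theorem idxOf_le_of_getElem (l : List Char) (a : Char) :
    ∀ (n : Nat) (hn : n < l.length), l[n] = a → l.idxOf a ≤ n := by
  induction l with
  | nil => intro n hn; simp at hn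
  | cons c rest ih =>
      intro n hn hget
      by_cases hc : c = a
      · subst hc; simp [List.idxOf_cons_self]
      · cases n with
        | zero => simp at hget; exact absurd hget hc
        | succ m =>
            rw [List.idxOf_cons_ne rest hc, Nat.succ_eq_add_one]
            have := ih m (by simpa using hn) (by simpa using hget)
            omega

theorem find_eq_idxOf (cs : List Char) (h : ';' ∈ cs) :
    PySem.Chars.find cs [';'] = (cs.idxOf ';' : Int) := by
  have hinf : [';'] <:+: cs := by
    obtain ⟨s, t, rfl⟩ := List.append_of_mem h
    exact ⟨s, t, by simp⟩
  have hne : PySem.Chars.find cs [';'] ≠ -1 := by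
    rw [Ne, PySem.Chars.find_eq_neg_one_iff]; exact fun hx => hx hinf
  have h0 : PySem.Chars.findFrom cs [';'] ((0 : Nat) : Int) none = PySem.Chars.find cs [';'] := by
    simpa using PySem.Chars.findFrom_zero cs [';']
  have hspec := PySem.Chars.findFrom_natCast_spec cs [';'] 0 (by simp) (by rw [h0]; exact hne)
  rw [h0] at hspec
  obtain ⟨hle, hpre, hmin⟩ := hspec
  set j := PySem.Chars.find cs [';'] with hj
  rw [prefix_singleton_iff, List.head?_drop] at hpre
  have hjlt : j.toNat < cs.length := by
    by_contra hx
    rw [List.getElem?_eq_none (by omega)] at hpre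
    cases hpre
  have hget : cs[j.toNat] = ';' := by
    rw [List.getElem?_eq_getElem hjlt] at hpre
    exact Option.some.inj hpre
  have h1 : cs.idxOf ';' ≤ j.toNat := idxOf_le_of_getElem cs ';' j.toNat hjlt hget
  have h2 : j.toNat ≤ cs.idxOf ';' := by
    by_contra hx
    have hilt : cs.idxOf ';' < cs.length := List.idxOf_lt_length_of_mem h
    have := hmin (cs.idxOf ';') (Nat.zero_le _) (by omega)
    rw [prefix_singleton_iff, List.head?_drop, List.getElem?_eq_getElem hilt] at this
    exact this (by simp [List.getElem_idxOf])
  omega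

theorem fmB_go_spec (k : Nat) (hk : 1 ≤ k) : ∀ (cs : List Char),
    (match fmB_go k cs with
      | none => ([] : List Char)
      | some r => ';' :: r) = fmS cs k := by
  induction k with
  | zero => omega
  | succ n ih =>
      intro cs
      by_cases h : ';' ∈ cs
      · have hfind := find_eq_idxOf cs h
        have hslice : PySem.List.slice cs (some ((cs.idxOf ';' : Int) + 1)) none
            = cs.drop (cs.idxOf ';' + 1) := by
          have hcast : ((cs.idxOf ';' : Int) + 1) = ((cs.idxOf ';' + 1 : Nat) : Int) := by
            push_cast; ring
          rw [hcast, PySem.List.slice_from cs (by positivity)]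
          simp
        have hne : (cs.idxOf ';' : Int) ≠ -1 := by omega
        cases n with
        | zero =>
            simp only [fmB_go, hfind, if_neg hne]
            rw [hslice]
            exact (fmS_one cs h).symm
        | succ m =>
            simp only [fmB_go, hfind, if_neg hne]
            rw [hslice, fmS_succ cs h (m + 1) (by omega)]
            exact ih (by omega) _
      · have hfind : PySem.Chars.find cs [';'] = -1 := by
          rw [PySem.Chars.find_eq_neg_one_iff]
          intro hinf
          exact h (hinf.mem (by simp))
        simp only [fmB_go, hfind]
        exact (fmS_not_mem cs h _).symm

-- ===== VERDICT (by name: the statement is the Claim_ definition above) =====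
theorem fetch_message_spec : Claim_equal_fetch_message := by
  intro message _
  unfold Spec_fetch_message fetch_message fetch_message_alt
  rw [fmA_go_spec message.toList 0 (by omega)]
  rw [← fmB_go_spec 3 (by omega) message.toList]
  cases hb : fmB_go 3 message.toList with
  | none => rfl
  | some r => rfl
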